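-- pv_equiv track=rewrite | github.com/Aliladla/hackathon0-silvertier | src/utils/vault_manager.py | _add_recent_activity
-- ===== SOURCE A (Python) =====
-- def _add_recent_activity(content: str, activity_line: str, max_items: int = 10) -> str:
--     """Add activity line to recent activity section."""
--     lines = content.split('\n')
--
--     # Find Recent Activity section
--     activity_index = -1
--     for i, line in enumerate(lines):
--         if line.startswith('## Recent Activity'):
--             activity_index = i
--             break
--
--     if activity_index == -1:
--         return content
--
--     # Find next section or end
--     next_section_index = len(lines)
--     for i in range(activity_index + 1, len(lines)):
--         if lines[i].startswith('##'):
--             next_section_index = i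
--             break
--
--     # Extract existing activities
--     existing_activities = []
--     for i in range(activity_index + 1, next_section_index):
--         line = lines[i].strip()
--         if line.startswith('- ['):
--             existing_activities.append(line)
--
--     # Add new activity at the top
--     new_activities = [activity_line] + existing_activities
--
--     # Keep only last max_items
--     new_activities = new_activities[:max_items]
--
--     # Rebuild content
--     new_lines = lines[:activity_index + 1]
--     new_lines.append('')
--     new_lines.extend(new_activities)
--     new_lines.append('')
--     new_lines.extend(lines[next_section_index:])
--
--     return '\n'.join(new_lines)
-- ===== SOURCE B (Python) =====
-- def _add_recent_activity(content: str, activity_line: str, max_items: int = 10) -> str: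
--     """Add activity line to recent activity section (single-pass state machine)."""
--     head, acts, tail = [], [], []
--     mode = 0  # 0 = before header, 1 = inside section, 2 = after section
--     for line in content.split('\n'):
--         if mode == 0:
--             head.append(line)
--             if line.startswith('## Recent Activity'):
--                 mode = 1
--         elif mode == 1:
--             if line.startswith('##'):
--                 tail.append(line)
--                 mode = 2
--             elif line.strip().startswith('- ['):
--                 acts.append(line.strip())
--         else:
--             tail.append(line)
--     if mode == 0:
--         return content
--     new_acts = ([activity_line] + acts)[:max_items]
--     return '\n'.join(head + [''] + new_acts + [''] + tail)
-- ===== Notes on version B (the rewrite author's own statement) =====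
-- stated objective: alternative
-- what changed: Replaced A's three sequential index-based scans (find header, find next section, re-scan the range for activities) plus slice arithmetic by a single state-machine pass over the split lines that accumulates prefix, existing activities and tail in one traversal.
import Mathlib
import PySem

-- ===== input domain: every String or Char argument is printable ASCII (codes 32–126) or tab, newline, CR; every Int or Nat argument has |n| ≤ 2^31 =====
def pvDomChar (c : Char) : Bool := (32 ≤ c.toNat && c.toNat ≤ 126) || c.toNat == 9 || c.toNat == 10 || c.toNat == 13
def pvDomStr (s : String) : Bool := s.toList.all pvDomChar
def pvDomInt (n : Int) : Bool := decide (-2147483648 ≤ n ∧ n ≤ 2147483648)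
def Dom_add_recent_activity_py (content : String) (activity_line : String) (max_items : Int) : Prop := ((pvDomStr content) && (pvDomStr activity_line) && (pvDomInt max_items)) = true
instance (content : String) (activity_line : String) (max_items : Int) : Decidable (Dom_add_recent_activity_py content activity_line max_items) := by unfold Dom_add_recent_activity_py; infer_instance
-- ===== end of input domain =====

-- B replaces A's three sequential index-based scans and slice arithmetic by a single
-- state-machine pass over the lines (objective: alternative decomposition, same cost).

-- ===== PORT A =====
-- loop 1: 'for i, line in enumerate(lines): if line.startswith(...): activity_index = i; break' (else -1)
def pvFindHdr : List (Int × String) → Int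
  | [] => -1
  | (i, line) :: rest =>
    if PySem.Str.startswith line "## Recent Activity" then i else pvFindHdr rest

-- loop 2: 'for i in range(ai+1, len(lines)): if lines[i].startswith("##"): nsi = i; break' (else default)
def pvFindNext (lines : List String) : List Int → Int → Int
  | [], dflt => dflt
  | i :: rest, dflt =>
    if PySem.Str.startswith (PySem.List.pyGetD lines i "") "##" then i
    else pvFindNext lines rest dflt

def add_recent_activity_py (content : String) (activity_line : String) (max_items : Int) : String :=
  let lines := (PySem.Str.split? content "\n").getD []
  let activity_index := pvFindHdr (PySem.List.enumerate lines 0)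
  if activity_index == -1 then content
  else
    let next_section_index :=
      pvFindNext lines (PySem.List.pyRange (activity_index + 1) (PySem.List.len lines) 1)
        (PySem.List.len lines)
    let existing_activities :=
      (PySem.List.pyRange (activity_index + 1) next_section_index 1).foldl
        (fun acc i =>
          if PySem.Str.startswith (PySem.Str.strip (PySem.List.pyGetD lines i "")) "- [" then
            acc ++ [PySem.Str.strip (PySem.List.pyGetD lines i "")]
          else acc) []
    let new_activities := [activity_line] ++ existing_activities
    let new_activities := PySem.List.slice new_activities none (some max_items)
    let new_lines := PySem.List.slice lines none (some (activity_index + 1))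
    let new_lines := new_lines ++ [""]
    let new_lines := new_lines ++ new_activities
    let new_lines := new_lines ++ [""]
    let new_lines := new_lines ++ PySem.List.slice lines (some next_section_index) none
    PySem.Str.join "\n" new_lines

-- ===== PORT B =====
-- the single-pass state machine: mode 0 = before the header, 1 = inside the section, 2 = after it
def pvStepB (st : Nat × List String × List String × List String) (line : String) :
    Nat × List String × List String × List String :=
  match st with
  | (mode, head, acts, tail) =>
    if mode == 0 then
      (if PySem.Str.startswith line "## Recent Activity" then 1 else 0, head ++ [line], acts, tail)
    else if mode == 1 then
      if PySem.Str.startswith line "##" then (2, head, acts, tail ++ [line])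
      else if PySem.Str.startswith (PySem.Str.strip line) "- [" then
        (1, head, acts ++ [PySem.Str.strip line], tail)
      else (1, head, acts, tail)
    else (2, head, acts, tail ++ [line])

def add_recent_activity_py_alt (content : String) (activity_line : String) (max_items : Int) : String :=
  match ((PySem.Str.split? content "\n").getD []).foldl pvStepB (0, [], [], []) with
  | (mode, head, acts, tail) =>
    if mode == 0 then content
    else
      let new_acts := PySem.List.slice ([activity_line] ++ acts) none (some max_items)
      PySem.Str.join "\n" (head ++ [""] ++ new_acts ++ [""] ++ tail)

-- ===== PRECONDITION & SPEC =====
def Spec_add_recent_activity_py (content : String) (activity_line : String) (max_items : Int) (out : String) : Prop := out = add_recent_activity_py_alt content activity_line max_items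
instance (content : String) (activity_line : String) (max_items : Int) (out : String) : Decidable (Spec_add_recent_activity_py content activity_line max_items out) := by unfold Spec_add_recent_activity_py; infer_instance

-- ===== CLAIM (what is proved, stated in full; the proofs are below) =====
def Claim_equal_add_recent_activity_py : Prop := ∀ (content : String) (activity_line : String) (max_items : Int), Dom_add_recent_activity_py content activity_line max_items → Spec_add_recent_activity_py content activity_line max_items (add_recent_activity_py content activity_line max_items)

-- ===== LEMMAS AND PROOFS =====

-- abbreviations for the three line tests (proof-side only)
def pvP (l : String) : Bool := PySem.Str.startswith l "## Recent Activity"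
def pvQ (l : String) : Bool := PySem.Str.startswith l "##"
def pvR (l : String) : Bool := PySem.Str.startswith (PySem.Str.strip l) "- ["

-- A's first loop finds no header iff no line has one
theorem pvFindHdr_none (xs : List String) (s : Int) (h : ∀ l ∈ xs, pvP l = false) :
    pvFindHdr (PySem.List.enumerate xs s) = -1 := by
  induction xs generalizing s with
  | nil => simp [PySem.List.enumerate_nil, pvFindHdr]
  | cons x t ih =>
    have hx := h x (by simp)
    simp only [PySem.List.enumerate_cons, pvFindHdr]
    rw [show PySem.Str.startswith x "## Recent Activity" = false from hx]
    simpa using ih (s + 1) (fun l hl => h l (by simp [hl]))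

-- A's first loop returns the index of the first header line
theorem pvFindHdr_found (pre : List String) (h : String) (rest : List String) (s : Int)
    (hpre : ∀ l ∈ pre, pvP l = false) (hh : pvP h = true) :
    pvFindHdr (PySem.List.enumerate (pre ++ h :: rest) s) = s + pre.length := by
  induction pre generalizing s with
  | nil =>
    simp only [List.nil_append, PySem.List.enumerate_cons, pvFindHdr]
    rw [show PySem.Str.startswith h "## Recent Activity" = true from hh]
    simp
  | cons x t ih =>
    have hx := hpre x (by simp)
    simp only [List.cons_append, PySem.List.enumerate_cons, pvFindHdr]
    rw [show PySem.Str.startswith x "## Recent Activity" = false from hx]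
    simp only [if_neg Bool.false_ne_true]
    rw [ih (s + 1) (fun l hl => hpre l (by simp [hl]))]
    simp only [List.length_cons]
    push_cast
    ring

-- A's second loop: scanning range(k, len) over lines with drop k = sec ++ tl,
-- no '##' inside sec and tl empty-or-starting-with-'##', yields k + |sec|
theorem pvFindNext_eq (lines : List String) (sec tl : List String) (k : Nat)
    (hk : k ≤ lines.length) (hdrop : lines.drop k = sec ++ tl)
    (hsec : ∀ l ∈ sec, pvQ l = false)
    (htl : tl = [] ∨ ∃ x t', tl = x :: t' ∧ pvQ x = true) :
    pvFindNext lines (PySem.List.pyRange (k : Int) (lines.length : Int) 1) (lines.length : Int)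
      = ((k + sec.length : Nat) : Int) := by
  induction sec generalizing k with
  | nil =>
    rcases htl with h0 | ⟨x, t', hx, hq⟩
    · subst h0
      simp only [List.nil_append] at hdrop
      have : k = lines.length := by
        have := List.drop_eq_nil_iff.mp hdrop
        omega
      subst this
      rw [PySem.List.pyRange_one_eq_nil (by omega)]
      simp [pvFindNext]
    · subst hx
      have hklt : k < lines.length := by
        have : (lines.drop k).length = lines.length - k := List.length_drop ..
        rw [hdrop] at this
        simp at this
        omega
      rw [PySem.List.pyRange_one_cons (by exact_mod_cast hklt)]
      simp only [pvFindNext]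
      have hget : PySem.List.pyGetD lines (k : Int) "" = x := by
        rw [PySem.List.pyGetD_natCast]
        have : lines[k]? = some x := by
          rw [List.getElem?_eq_getElem hklt]
          have : lines[k] = (lines.drop k).head (by simp [hdrop]) := by
            rw [List.head_drop]
          rw [this]
          simp [hdrop]
        simp [List.getD_eq_getElem?_getD, this]
      rw [hget, show PySem.Str.startswith x "##" = true from hq]
      simp
  | cons x sec' ih =>
    have hklt : k < lines.length := by
      have := List.length_drop (l := lines) (i := k)
      rw [hdrop] at this
      simp at this
      omega
    rw [PySem.List.pyRange_one_cons (by exact_mod_cast hklt)]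
    simp only [pvFindNext]
    have hget : PySem.List.pyGetD lines (k : Int) "" = x := by
      rw [PySem.List.pyGetD_natCast]
      have : lines[k]? = some x := by
        rw [List.getElem?_eq_getElem hklt]
        have : lines[k] = (lines.drop k).head (by simp [hdrop]) := by
          rw [List.head_drop]
        rw [this]
        simp [hdrop]
      simp [List.getD_eq_getElem?_getD, this]
    rw [hget, show PySem.Str.startswith x "##" = false from hsec x (by simp)]
    simp only [if_neg Bool.false_ne_true]
    have hdrop' : lines.drop (k + 1) = sec' ++ tl := by
      rw [← List.tail_drop, hdrop]
      simp
    have := ih (k + 1) (by omega) hdrop' (fun l hl => hsec l (by simp [hl])) 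
    rw [show ((k : Int) + 1) = ((k + 1 : Nat) : Int) by push_cast; ring, this]
    simp only [List.length_cons]
    push_cast
    ring
  
-- A's third loop over range(k, k+|sec|) collects the stripped '- [' lines of sec
theorem pvCollect_eq (lines : List String) (sec rest : List String) (k : Nat) (acc : List String)
    (hdrop : lines.drop k = sec ++ rest) :
    (PySem.List.pyRange (k : Int) ((k + sec.length : Nat) : Int) 1).foldl
      (fun acc i =>
        if PySem.Str.startswith (PySem.Str.strip (PySem.List.pyGetD lines i "")) "- [" then
          acc ++ [PySem.Str.strip (PySem.List.pyGetD lines i "")]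
        else acc) acc
    = acc ++ (sec.filter pvR).map PySem.Str.strip := by
  induction sec generalizing k acc with
  | nil =>
    rw [show ((k + [].length : Nat) : Int) = (k : Int) by simp]
    rw [PySem.List.pyRange_one_eq_nil (by omega)]
    simp
  | cons x sec' ih =>
    have hklt : k < lines.length := by
      have := List.length_drop (l := lines) (i := k)
      rw [hdrop] at this
      simp at this
      omega
    rw [PySem.List.pyRange_one_cons (by simp only [List.length_cons]; push_cast; omega)]
    simp only [List.foldl_cons]
    have hget : PySem.List.pyGetD lines (k : Int) "" = x := by
      rw [PySem.List.pyGetD_natCast]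
      have : lines[k]? = some x := by
        rw [List.getElem?_eq_getElem hklt]
        have : lines[k] = (lines.drop k).head (by simp [hdrop]) := by
          rw [List.head_drop]
        rw [this]
        simp [hdrop]
      simp [List.getD_eq_getElem?_getD, this]
    rw [hget]
    have hdrop' : lines.drop (k + 1) = sec' ++ rest := by
      rw [← List.tail_drop, hdrop]
      simp
    have hrw : ((k : Int) + 1) = ((k + 1 : Nat) : Int) := by push_cast; ring
    have hrw2 : ((k + (x :: sec').length : Nat) : Int) = (((k + 1) + sec'.length : Nat) : Int) := by
      simp only [List.length_cons]; push_cast; ring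
    rw [hrw2]
    by_cases hx : pvR x = true
    · have hx' : PySem.Str.startswith (PySem.Str.strip x) "- [" = true := hx
      rw [if_pos hx', hrw, ih (k + 1) (acc ++ [PySem.Str.strip x]) hdrop']
      rw [show List.filter pvR (x :: sec') = x :: List.filter pvR sec' by
        rw [List.filter_cons, hx]; simp]
      simp
    · have hx' : PySem.Str.startswith (PySem.Str.strip x) "- [" = false := by
        simpa [pvR] using hx
      rw [if_neg (by rw [hx']; simp), hrw, ih (k + 1) acc hdrop']
      have hx0 : pvR x = false := by simpa using hx
      rw [show List.filter pvR (x :: sec') = List.filter pvR sec' by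
        rw [List.filter_cons, hx0]; simp]

-- step lemmas for B's state machine
theorem pvStepB_mode0_no (hd a t : List String) (x : String)
    (hx : pvP x = false) : pvStepB (0, hd, a, t) x = (0, hd ++ [x], a, t) := by
  simp only [pvStepB]; rw [show PySem.Str.startswith x "## Recent Activity" = false from hx]; rfl

theorem pvStepB_mode0_yes (hd a t : List String) (x : String)
    (hx : pvP x = true) : pvStepB (0, hd, a, t) x = (1, hd ++ [x], a, t) := by
  simp only [pvStepB]; rw [show PySem.Str.startswith x "## Recent Activity" = true from hx]; rfl

theorem pvStepB_mode1_sec (hd a t : List String) (x : String)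
    (hq : pvQ x = true) : pvStepB (1, hd, a, t) x = (2, hd, a, t ++ [x]) := by
  simp only [pvStepB]; rw [show PySem.Str.startswith x "##" = true from hq]; rfl

theorem pvStepB_mode1_act (hd a t : List String) (x : String)
    (hq : pvQ x = false) (hr : pvR x = true) :
    pvStepB (1, hd, a, t) x = (1, hd, a ++ [PySem.Str.strip x], t) := by
  simp only [pvStepB]
  rw [show PySem.Str.startswith x "##" = false from hq,
    show PySem.Str.startswith (PySem.Str.strip x) "- [" = true from hr]
  rfl

theorem pvStepB_mode1_skip (hd a t : List String) (x : String)
    (hq : pvQ x = false) (hr : pvR x = false) :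
    pvStepB (1, hd, a, t) x = (1, hd, a, t) := by
  simp only [pvStepB]
  rw [show PySem.Str.startswith x "##" = false from hq,
    show PySem.Str.startswith (PySem.Str.strip x) "- [" = false from hr]
  rfl

theorem pvStepB_mode2 (hd a t : List String) (x : String) :
    pvStepB (2, hd, a, t) x = (2, hd, a, t ++ [x]) := by
  simp only [pvStepB]; rfl

-- B's fold in mode 0 over header-free lines just accumulates head
theorem pvFoldB_mode0 (xs : List String) (hd a t : List String)
    (h : ∀ l ∈ xs, pvP l = false) :
    xs.foldl pvStepB (0, hd, a, t) = (0, hd ++ xs, a, t) := by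
  induction xs generalizing hd with
  | nil => simp
  | cons x s ih =>
    rw [List.foldl_cons, pvStepB_mode0_no hd a t x (h x (by simp))]
    rw [ih (hd ++ [x]) (fun l hl => h l (by simp [hl]))]
    simp

-- B's fold in mode 1 over '##'-free lines collects the stripped '- [' lines
theorem pvFoldB_mode1 (xs : List String) (hd a t : List String)
    (h : ∀ l ∈ xs, pvQ l = false) :
    xs.foldl pvStepB (1, hd, a, t) = (1, hd, a ++ (xs.filter pvR).map PySem.Str.strip, t) := by
  induction xs generalizing a with
  | nil => simp
  | cons x s ih =>
    have hq := h x (by simp)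
    have hrest : ∀ l ∈ s, pvQ l = false := fun l hl => h l (by simp [hl])
    by_cases hr : pvR x = true
    · rw [List.foldl_cons, pvStepB_mode1_act hd a t x hq hr,
        ih (a ++ [PySem.Str.strip x]) hrest,
        show List.filter pvR (x :: s) = x :: List.filter pvR s by rw [List.filter_cons, hr]; simp]
      simp
    · have hr0 : pvR x = false := by simpa using hr
      rw [List.foldl_cons, pvStepB_mode1_skip hd a t x hq hr0, ih a hrest,
        show List.filter pvR (x :: s) = List.filter pvR s by rw [List.filter_cons, hr0]; simp]

-- B's fold in mode 2 appends everything to tail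
theorem pvFoldB_mode2 (xs : List String) (hd a t : List String) :
    xs.foldl pvStepB (2, hd, a, t) = (2, hd, a, t ++ xs) := by
  induction xs generalizing t with
  | nil => simp
  | cons x s ih =>
    rw [List.foldl_cons, pvStepB_mode2, ih (t ++ [x])]
    simp

-- ===== VERDICT (by name: the statement is the Claim_ definition above) =====
theorem add_recent_activity_py_spec : Claim_equal_add_recent_activity_py := by
  intro content activity_line max_items _
  unfold Spec_add_recent_activity_py
  unfold add_recent_activity_py add_recent_activity_py_alt
  obtain ⟨lines, hsp⟩ : ∃ l, PySem.Str.split? content "\n" = some l := by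
    simp [PySem.Str.split?, PySem.Chars.split?]
  rw [hsp]
  simp only [Option.getD_some]
  by_cases hall : ∀ l ∈ lines, pvP l = false
  · -- no header: both return content
    rw [pvFindHdr_none lines 0 hall]
    rw [pvFoldB_mode0 lines [] [] [] hall]
    simp
  · -- header present: decompose lines = pre ++ h :: rest
    push Not at hall
    obtain ⟨w, hwmem, hwp⟩ := hall
    set pre := lines.takeWhile (fun l => !(pvP l)) with hpre
    set r0 := lines.dropWhile (fun l => !(pvP l)) with hr0
    have hsplit : pre ++ r0 = lines := List.takeWhile_append_dropWhile
    have hr0ne : r0 ≠ [] := by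
      intro hemp
      have : pre = lines := by rw [← hsplit, hemp]; simp
      have hw' : w ∈ pre := this ▸ hwmem
      have := List.mem_takeWhile_imp hw'
      simp at this
      exact (by simpa [this] using hwp)
    obtain ⟨h, rest, hr0eq⟩ := List.exists_cons_of_ne_nil hr0ne
    have hpreP : ∀ l ∈ pre, pvP l = false := by
      intro l hl
      have := List.mem_takeWhile_imp hl
      simpa using this
    have hhP : pvP h = true := by
      have := List.head?_dropWhile_not (p := fun l => !(pvP l)) (l := lines)
      rw [← hr0, hr0eq] at this
      simp at this
      exact this
    have hlineseq : lines = pre ++ h :: rest := by rw [← hsplit, hr0eq]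
    -- decompose rest = sec ++ tl at the first '##'
    set sec := rest.takeWhile (fun l => !(pvQ l)) with hsec
    set tl := rest.dropWhile (fun l => !(pvQ l)) with htl
    have hrestsplit : sec ++ tl = rest := List.takeWhile_append_dropWhile
    have hsecQ : ∀ l ∈ sec, pvQ l = false := by
      intro l hl
      have := List.mem_takeWhile_imp hl
      simpa using this
    have htlQ : tl = [] ∨ ∃ x t', tl = x :: t' ∧ pvQ x = true := by
      cases hcase : tl with
      | nil => exact Or.inl rfl
      | cons x t' =>
        refine Or.inr ⟨x, t', rfl, ?_⟩
        have := List.head?_dropWhile_not (p := fun l => !(pvQ l)) (l := rest)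
        rw [← htl, hcase] at this
        simp at this
        exact this
    -- A's side
    have hA1 : pvFindHdr (PySem.List.enumerate lines 0) = (pre.length : Int) := by
      rw [hlineseq, pvFindHdr_found pre h rest 0 hpreP hhP]
      simp
    rw [hA1]
    have hne : (((pre.length : Int)) == (-1 : Int)) = false := by
      simp only [beq_eq_false_iff_ne, ne_eq]
      omega
    rw [hne]
    rw [if_neg Bool.false_ne_true]
    -- index bookkeeping
    set k : Nat := pre.length + 1 with hk
    have hkle : k ≤ lines.length := by
      rw [hlineseq, hk]
      simp only [List.length_append, List.length_cons]
      omega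
    have hdropk : lines.drop k = sec ++ tl := by
      rw [hlineseq, hk]
      rw [show pre.length + 1 = (pre ++ [h]).length by simp]
      rw [show pre ++ h :: rest = (pre ++ [h]) ++ rest by simp]
      rw [List.drop_left, hrestsplit]
    have hcast : (pre.length : Int) + 1 = (k : Int) := by rw [hk]; push_cast; ring
    rw [PySem.List.len_eq, hcast]
    have hA2 := pvFindNext_eq lines sec tl k hkle hdropk hsecQ htlQ
    rw [hA2]
    have hA3 := pvCollect_eq lines sec tl k [] hdropk
    rw [hA3]
    simp only [List.nil_append]
    -- slices
    have hslice1 : PySem.List.slice lines none (some (k : Int)) = pre ++ [h] := by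
      rw [PySem.List.slice_to_natCast]
      rw [hlineseq, show pre ++ h :: rest = (pre ++ [h]) ++ rest by simp]
      exact List.take_left' (by simp [hk])
    have hslice2 : PySem.List.slice lines (some ((k + sec.length : Nat) : Int)) none = tl := by
      rw [PySem.List.slice_from_natCast]
      rw [← List.drop_drop, hdropk, List.drop_left]
    rw [hslice1, hslice2]
    -- B's side
    have hB : lines.foldl pvStepB (0, [], [], []) =
        (if tl = [] then 1 else 2, pre ++ [h],
          (sec.filter pvR).map PySem.Str.strip, tl) := by
      rw [hlineseq, show pre ++ h :: rest = pre ++ [h] ++ rest by simp]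
      rw [List.foldl_append, List.foldl_append]
      rw [pvFoldB_mode0 pre [] [] [] hpreP]
      rw [List.foldl_cons, List.foldl_nil, pvStepB_mode0_yes _ _ _ _ hhP]
      rw [← hrestsplit, List.foldl_append]
      rcases htlQ with h0 | ⟨x, t', hx, hq⟩
      · rw [h0, List.foldl_nil, pvFoldB_mode1 sec _ _ _ hsecQ]
        simp
      · rw [pvFoldB_mode1 sec _ _ _ hsecQ, hx, List.foldl_cons,
          pvStepB_mode1_sec _ _ _ _ hq, pvFoldB_mode2]
        rw [if_neg (by simp)]
        simp
    rw [hB]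
    by_cases htl0 : tl = []
    · rw [if_pos htl0]
      rw [show ((1 : Nat) == 0) = false from rfl]
      simp
    · rw [if_neg htl0]
      rw [show ((2 : Nat) == 0) = false from rfl]
      simp
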